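-- pv_equiv track=rewrite | github.com/cry999/AtCoder | beginner/134/E.py | sequence_decomposing
-- ===== SOURCE A (Python) =====
-- import bisect
-- import collections
--
-- def sequence_decomposing(N: int, A: list)->int:
--     mins = collections.deque([A[0]])
--
--     for a in A[1:]:
--         i = bisect.bisect_left(mins, a)
--         if i == 0:
--             mins.appendleft(a)
--         else:
--             mins[i-1] = a
--
--     return len(mins)
-- ===== SOURCE B (Python) =====
-- def sequence_decomposing(N: int, A: list) -> int:
--     # Dynamic programming: dp holds (value, length of the longest non-increasing
--     # subsequence ending at that value); the answer is the maximum such length,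
--     # which equals the minimum number of strictly increasing sequences.
--     dp = []
--     best = 0
--     for a in A:
--         m = 0
--         for v, d in dp:
--             if v >= a and d > m:
--                 m = d
--         dp.append((a, m + 1))
--         if m + 1 > best:
--             best = m + 1
--     return best
-- ===== Notes on version B (the rewrite author's own statement) =====
-- stated objective: alternative
-- what changed: Replaces A's greedy patience-style pile maintenance (deque kept sorted, binary search + replace-or-prepend) by the textbook dynamic program that computes, per element, the length of the longest non-increasing subsequence ending there and returns the maximum; no sorted structure, no binary search.
import Mathlib
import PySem

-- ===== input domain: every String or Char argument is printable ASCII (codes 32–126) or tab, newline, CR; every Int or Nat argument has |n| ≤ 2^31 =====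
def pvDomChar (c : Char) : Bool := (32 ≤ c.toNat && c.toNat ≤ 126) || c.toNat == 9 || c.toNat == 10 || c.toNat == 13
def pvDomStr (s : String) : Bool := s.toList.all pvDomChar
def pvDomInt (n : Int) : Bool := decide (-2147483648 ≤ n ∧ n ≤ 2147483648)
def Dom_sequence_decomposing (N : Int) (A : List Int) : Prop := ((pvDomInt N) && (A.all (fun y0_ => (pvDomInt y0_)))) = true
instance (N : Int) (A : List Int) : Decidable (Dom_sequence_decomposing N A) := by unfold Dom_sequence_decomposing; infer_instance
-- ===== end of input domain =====

-- B replaces A's greedy patience-style pile maintenance (sorted deque, binary search,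
-- replace-or-prepend) by the textbook dynamic program over ending positions.

-- ===== PORT A =====
-- bisect.bisect_left on a sorted list: first index whose element is ≥ a.
-- Exact on sorted lists — A's `mins` is kept sorted ascending throughout.
def pyBisectLeft (xs : List Int) (a : Int) : Nat :=
  (xs.takeWhile (fun x => decide (x < a))).length

-- one iteration of A's for-loop over `mins`
def stepA (mins : List Int) (a : Int) : List Int :=
  let i := pyBisectLeft mins a
  if i = 0 then a :: mins else mins.set (i - 1) a

def sequence_decomposing (N : Int) (A : List Int) : Int :=
  match A with
  | [] => 0  -- unreachable under Pre_ (Python raises IndexError at A[0])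
  | x :: rest => ((rest.foldl stepA [x]).length : Int)

-- ===== PORT B =====
-- B's inner for-loop: the largest dp value among entries with value ≥ a (0 if none)
def innerMax (dp : List (Int × Int)) (a : Int) : Int :=
  dp.foldl (fun m vd => if vd.1 ≥ a ∧ vd.2 > m then vd.2 else m) 0

-- one iteration of B's outer for-loop over the state (dp, best)
def stepDP (st : List (Int × Int) × Int) (a : Int) : List (Int × Int) × Int :=
  let m := innerMax st.1 a
  (st.1 ++ [(a, m + 1)], if m + 1 > st.2 then m + 1 else st.2)

def sequence_decomposing_alt (N : Int) (A : List Int) : Int :=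
  (A.foldl stepDP ([], 0)).2

-- ===== PRECONDITION & SPEC =====
-- Pre_ excludes only the empty list, on which A raises IndexError at A[0].
def Pre_sequence_decomposing (N : Int) (A : List Int) : Prop := A ≠ []
instance (N : Int) (A : List Int) : Decidable (Pre_sequence_decomposing N A) := by
  unfold Pre_sequence_decomposing; infer_instance
def pvWitness_sequence_decomposing : Int × List Int := (3, [2, 0, 1])

def Spec_sequence_decomposing (N : Int) (A : List Int) (out : Int) : Prop :=
  out = sequence_decomposing_alt N A
instance (N : Int) (A : List Int) (out : Int) : Decidable (Spec_sequence_decomposing N A out) := by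
  unfold Spec_sequence_decomposing; infer_instance

-- ===== CLAIM (what is proved, stated in full; the proofs are below) =====
def Claim_equal_sequence_decomposing : Prop := ∀ (N : Int) (A : List Int), Dom_sequence_decomposing N A → Pre_sequence_decomposing N A → Spec_sequence_decomposing N A (sequence_decomposing N A)

-- ===== LEMMAS AND PROOFS =====

-- The common abstraction: the pile state read back-to-front (descending).
-- `stepR` is `stepA` in reversed coordinates: j counts current piles whose top is ≥ a.
def stepR (r : List Int) (a : Int) : List Int :=
  let j := r.countP (fun x => decide (a ≤ x))
  if j = r.length then r ++ [a] else r.set j a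

-- ---- generic facts about innerMax's foldl ----
theorem innerMax_go_ge (a : Int) :
    ∀ (dp : List (Int × Int)) (acc : Int),
      acc ≤ dp.foldl (fun m vd => if vd.1 ≥ a ∧ vd.2 > m then vd.2 else m) acc := by
  intro dp
  induction dp with
  | nil => intro acc; simp
  | cons p rest ih =>
    intro acc
    simp only [List.foldl_cons]
    split_ifs with h
    · exact le_trans (le_of_lt h.2) (ih _)
    · exact ih _

theorem innerMax_go_attained (a : Int) :
    ∀ (dp : List (Int × Int)) (acc : Int),
      dp.foldl (fun m vd => if vd.1 ≥ a ∧ vd.2 > m then vd.2 else m) acc = acc ∨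
      ∃ p ∈ dp, p.1 ≥ a ∧
        dp.foldl (fun m vd => if vd.1 ≥ a ∧ vd.2 > m then vd.2 else m) acc = p.2 := by
  intro dp
  induction dp with
  | nil => intro acc; left; simp
  | cons p rest ih =>
    intro acc
    simp only [List.foldl_cons]
    split_ifs with h
    · rcases ih p.2 with h1 | ⟨q, hq, hqa, hqe⟩
      · right; exact ⟨p, List.mem_cons_self, h.1, h1⟩
      · right; exact ⟨q, List.mem_cons_of_mem _ hq, hqa, hqe⟩
    · rcases ih acc with h1 | ⟨q, hq, hqa, hqe⟩
      · left; exact h1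
      · right; exact ⟨q, List.mem_cons_of_mem _ hq, hqa, hqe⟩

theorem innerMax_go_ub (a : Int) :
    ∀ (dp : List (Int × Int)) (acc : Int) (p : Int × Int), p ∈ dp → p.1 ≥ a →
      p.2 ≤ dp.foldl (fun m vd => if vd.1 ≥ a ∧ vd.2 > m then vd.2 else m) acc := by
  intro dp
  induction dp with
  | nil => intro acc p h; simp at h
  | cons q rest ih =>
    intro acc p hp hpa
    simp only [List.foldl_cons]
    rcases List.mem_cons.mp hp with rfl | hmem
    · split_ifs with h
      · exact innerMax_go_ge a rest p.2
      · have : ¬ p.2 > acc := fun hgt => h ⟨hpa, hgt⟩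
        exact le_trans (by omega) (innerMax_go_ge a rest acc)
    · split_ifs with h <;> exact ih _ p hmem hpa

-- ---- facts about the prefix count on a descending list ----
theorem desc_count_facts (a : Int) :
    ∀ (r : List Int), r.Pairwise (· ≥ ·) →
      (∀ k, k < r.countP (fun x => decide (a ≤ x)) → a ≤ r.getD k 0) ∧
      (∀ k, r.countP (fun x => decide (a ≤ x)) ≤ k → k < r.length → r.getD k 0 < a) := by
  intro r
  induction r with
  | nil => intro _; constructor <;> intro k h <;> simp_all
  | cons x rest ih =>
    intro hs
    rcases List.pairwise_cons.mp hs with ⟨hx, hrest⟩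
    rcases ih hrest with ⟨ih1, ih2⟩
    by_cases hax : a ≤ x
    · have hc : (x :: rest).countP (fun x => decide (a ≤ x))
          = rest.countP (fun x => decide (a ≤ x)) + 1 := by
        simp [List.countP_cons, hax]
      constructor
      · intro k hk
        rw [hc] at hk
        match k with
        | 0 => simpa using hax
        | Nat.succ k' => simpa using ih1 k' (by omega)
      · intro k hk1 hk2
        rw [hc] at hk1
        match k with
        | 0 => omega
        | Nat.succ k' =>
          simp only [List.length_cons] at hk2
          simpa using ih2 k' (by omega) (by omega)
    · have hall : ∀ y ∈ rest, y < a := by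
        intro y hy; have := hx y hy; omega
      have hc : (x :: rest).countP (fun x => decide (a ≤ x)) = 0 := by
        rw [List.countP_eq_zero]
        intro y hy
        rcases List.mem_cons.mp hy with rfl | hmem
        · simpa using hax
        · simpa using not_le.mpr (hall y hmem)
      constructor
      · intro k hk; rw [hc] at hk; omega
      · intro k _ hk2
        match k with
        | 0 => simpa using not_le.mp hax
        | Nat.succ k' =>
          simp only [List.length_cons] at hk2
          have hmem : rest.getD k' 0 ∈ rest := by
            rw [List.getD_eq_getElem _ _ (by omega)]
            exact List.getElem_mem _
          simpa using hall _ hmem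

-- setting position j to a larger value bounded by the prefix keeps the list descending
theorem desc_set {r : List Int} (a : Int) (hs : r.Pairwise (· ≥ ·)) {j : Nat}
    (hj : j < r.length) (hpre : ∀ k, k < j → a ≤ r.getD k 0) (hat : r.getD j 0 < a) :
    (r.set j a).Pairwise (· ≥ ·) := by
  have horig := List.pairwise_iff_getElem.mp hs
  have hja : r[j] < a := by rw [List.getD_eq_getElem _ _ hj] at hat; exact hat
  rw [List.pairwise_iff_getElem]
  intro k1 k2 h1 h2 hlt
  simp only [List.length_set] at h1 h2
  rw [List.getElem_set, List.getElem_set]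
  by_cases e1 : j = k1
  · by_cases e2 : j = k2
    · omega
    · simp only [if_pos e1, if_neg e2]
      have hk2j : r[k2] ≤ r[j] := horig j k2 hj h2 (by omega)
      omega
  · by_cases e2 : j = k2
    · simp only [if_neg e1, if_pos e2]
      have hk1 := hpre k1 (by omega)
      rw [List.getD_eq_getElem _ _ h1] at hk1
      omega
    · simp only [if_neg e1, if_neg e2]
      exact horig k1 k2 h1 h2 hlt

theorem stepR_sorted {r : List Int} (a : Int) (hs : r.Pairwise (· ≥ ·)) :
    (stepR r a).Pairwise (· ≥ ·) := by
  rcases desc_count_facts a r hs with ⟨f1, f2⟩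
  unfold stepR
  simp only
  split_ifs with hcase
  · -- all elements ≥ a
    rw [List.pairwise_append]
    refine ⟨hs, List.pairwise_singleton _ _, ?_⟩
    intro x hx y hy
    simp only [List.mem_singleton] at hy
    subst hy
    rcases List.mem_iff_getElem.mp hx with ⟨k, hk, rfl⟩
    have := f1 k (by omega)
    rwa [List.getD_eq_getElem _ _ hk] at this
  · have hjle : r.countP (fun x => decide (a ≤ x)) ≤ r.length := List.countP_le_length
    have hjlt : r.countP (fun x => decide (a ≤ x)) < r.length := by omega
    exact desc_set a hs hjlt (fun k hk => f1 k hk) (f2 _ (le_refl _) hjlt)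

-- ---- the DP invariant tying B's dp entries to the descending pile state ----
def DPInv (dp : List (Int × Int)) (r : List Int) : Prop :=
  r.Pairwise (· ≥ ·) ∧
  (∀ k, k < r.length → ∃ p ∈ dp, p.2 = (k : Int) + 1 ∧ p.1 = r.getD k 0) ∧
  (∀ p ∈ dp, ∃ k, k < r.length ∧ p.2 = (k : Int) + 1 ∧ p.1 ≤ r.getD k 0)

theorem innerMax_eq {dp : List (Int × Int)} {r : List Int} (hinv : DPInv dp r) (a : Int) :
    innerMax dp a = (r.countP (fun x => decide (a ≤ x)) : Int) := by
  rcases hinv with ⟨hs, hR, hD⟩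
  rcases desc_count_facts a r hs with ⟨f1, f2⟩
  set j := r.countP (fun x => decide (a ≤ x)) with hj
  have hjle : j ≤ r.length := List.countP_le_length
  apply le_antisymm
  · -- upper bound: every attained depth with value ≥ a is ≤ j
    rcases innerMax_go_attained a dp 0 with h0 | ⟨p, hp, hpa, hpe⟩
    · unfold innerMax; rw [h0]; positivity
    · rcases hD p hp with ⟨k, hk, hdep, hval⟩
      have : a ≤ r.getD k 0 := le_trans hpa hval
      have hkj : k < j := by
        by_contra hge
        have := f2 k (by omega) hk
        omega
      unfold innerMax; rw [hpe, hdep]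
      exact_mod_cast by omega
  · -- lower bound: the pile at position j-1 realizes depth j with value ≥ a
    rcases Nat.eq_zero_or_pos j with hj0 | hjpos
    · rw [hj0]; exact_mod_cast innerMax_go_ge a dp 0
    · rcases hR (j - 1) (by omega) with ⟨p, hp, hdep, hval⟩
      have hge : p.1 ≥ a := by rw [hval]; exact f1 (j - 1) (by omega)
      have := innerMax_go_ub a dp 0 p hp hge
      unfold innerMax
      rw [hdep] at this
      have hcast : ((j - 1 : Nat) : Int) = (j : Int) - 1 := by
        push_cast [Nat.cast_sub hjpos]; ring
      omega

theorem inv_step {dp : List (Int × Int)} {r : List Int} (hinv : DPInv dp r) (a : Int) :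
    DPInv (dp ++ [(a, innerMax dp a + 1)]) (stepR r a) := by
  have hIM := innerMax_eq hinv a
  rcases hinv with ⟨hs, hR, hD⟩
  rcases desc_count_facts a r hs with ⟨f1, f2⟩
  set j := r.countP (fun x => decide (a ≤ x)) with hj
  have hjle : j ≤ r.length := List.countP_le_length
  have hsorted := stepR_sorted a hs
  refine ⟨hsorted, ?_, ?_⟩
  · -- realizability
    intro k hk
    unfold stepR at hk ⊢
    simp only [← hj] at hk ⊢
    split_ifs at hk ⊢ with hcase
    · -- append case: r' = r ++ [a]
      rw [List.length_append, List.length_singleton] at hk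
      by_cases hkr : k < r.length
      · rcases hR k hkr with ⟨p, hp, hdep, hval⟩
        refine ⟨p, List.mem_append_left _ hp, hdep, ?_⟩
        rw [hval, List.getD_append _ _ _ _ hkr]
      · have hkeq : k = r.length := by omega
        refine ⟨(a, innerMax dp a + 1), List.mem_append_right _ (List.mem_singleton.mpr rfl), ?_, ?_⟩
        · simp only [hIM, hkeq, hcase]
        · subst hkeq
          simp [List.getD_eq_getElem?_getD, List.getElem?_append_right (le_refl r.length)]
    · -- set case: r' = r.set j a
      rw [List.length_set] at hk
      by_cases hkj : k = j
      · refine ⟨(a, innerMax dp a + 1), List.mem_append_right _ (List.mem_singleton.mpr rfl), ?_, ?_⟩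
        · simp only [hIM, hkj]
        · subst hkj
          rw [List.getD_eq_getElem _ _ (by simpa using hk), List.getElem_set_self]
      · rcases hR k hk with ⟨p, hp, hdep, hval⟩
        refine ⟨p, List.mem_append_left _ hp, hdep, ?_⟩
        rw [hval, List.getD_eq_getElem _ _ hk,
            List.getD_eq_getElem _ _ (by simpa using hk), List.getElem_set_ne (by omega)]
  · -- domination
    intro p hp
    rcases List.mem_append.mp hp with hold | hnew
    · rcases hD p hold with ⟨k, hk, hdep, hval⟩
      unfold stepR
      simp only [← hj]
      split_ifs with hcase
      · exact ⟨k, by simp [List.length_append]; omega, hdep,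
          by rw [List.getD_append _ _ _ _ hk]; exact hval⟩
      · refine ⟨k, by simpa using hk, hdep, ?_⟩
        by_cases hkj : k = j
        · have hgd : (r.set j a).getD k 0 = a := by
            rw [hkj, List.getD_eq_getElem _ _ (by simp only [List.length_set]; omega),
                List.getElem_set_self]
          have hlt := f2 k (by omega) hk
          rw [hgd]
          omega
        · rw [List.getD_eq_getElem _ _ (by simpa using hk), List.getElem_set_ne (by omega),
              ← List.getD_eq_getElem _ _ hk]
          exact hval
    · rw [List.mem_singleton] at hnew
      subst hnew
      unfold stepR
      simp only [← hj]
      split_ifs with hcase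
      · refine ⟨r.length, by simp, ?_, ?_⟩
        · simp only [hIM, hcase]
        · simp [List.getD_eq_getElem?_getD, List.getElem?_append_right (le_refl r.length)]
      · have hjlt : j < r.length := by omega
        refine ⟨j, by simpa using hjlt, by simp [hIM], ?_⟩
        rw [List.getD_eq_getElem _ _ (by simpa using hjlt), List.getElem_set_self]

theorem stepR_length {dp : List (Int × Int)} {r : List Int} (hinv : DPInv dp r) (a : Int) :
    ((stepR r a).length : Int) =
      if innerMax dp a + 1 > (r.length : Int) then innerMax dp a + 1 else (r.length : Int) := by
  have hIM := innerMax_eq hinv a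
  have hjle : r.countP (fun x => decide (a ≤ x)) ≤ r.length := List.countP_le_length
  unfold stepR
  simp only
  split_ifs with h1 h2 h3 <;>
    simp only [List.length_append, List.length_singleton, List.length_set, hIM] at * <;> omega

-- the main simulation of B's fold by stepR
theorem dp_fold (l : List Int) :
    ∀ (dp : List (Int × Int)) (r : List Int), DPInv dp r →
      (l.foldl stepDP (dp, (r.length : Int))).2 = ((l.foldl stepR r).length : Int) := by
  induction l with
  | nil => intro dp r _; simp
  | cons a rest ih =>
    intro dp r hinv
    simp only [List.foldl_cons]
    have hlen := stepR_length hinv a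
    have hstep := inv_step hinv a
    have : stepDP (dp, (r.length : Int)) a
        = (dp ++ [(a, innerMax dp a + 1)], ((stepR r a).length : Int)) := by
      unfold stepDP
      simp only
      rw [hlen]
    rw [this]
    exact ih _ _ hstep

-- ---- A's fold in reversed coordinates ----
-- bisect_left counts the elements < a when the list is sorted
theorem takeWhile_len_eq_countP (p : Int → Bool)
    (hp : ∀ x y : Int, x ≤ y → p y = true → p x = true) :
    ∀ (l : List Int), l.Pairwise (· ≤ ·) →
      (l.takeWhile p).length = l.countP p := by
  intro l hl
  induction l with
  | nil => simp
  | cons x xs ih =>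
    rcases List.pairwise_cons.mp hl with ⟨hx, hxs⟩
    by_cases hpx : p x = true
    · simp [List.takeWhile_cons, List.countP_cons, hpx, ih hxs]
    · have hall : ∀ y ∈ xs, p y = false := by
        intro y hy
        by_contra hne
        have : p y = true := by
          cases h : p y with
          | false => exact absurd h hne
          | true => rfl
        exact hpx (hp x y (hx y hy) this)
      have : xs.countP p = 0 := by
        rw [List.countP_eq_zero]
        intro y hy
        simp [hall y hy]
      simp [List.takeWhile_cons, List.countP_cons, hpx, this]

theorem reverse_set (l : List Int) (n : Nat) (x : Int) (hn : n < l.length) :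
    (l.set n x).reverse = l.reverse.set (l.length - 1 - n) x := by
  apply List.ext_getElem
  · simp
  · intro i h1 h2
    simp only [List.length_reverse, List.length_set] at h1 h2
    rw [List.getElem_reverse, List.getElem_set, List.getElem_set, List.getElem_reverse]
    simp only [List.length_set]
    by_cases hni : n = l.length - 1 - i
    · have h3 : l.length - 1 - (l.length - 1 - i) = i := by omega
      simp [hni, h3]
    · have h3 : ¬ (l.length - 1 - n = i) := by omega
      simp [hni, h3]

theorem stepA_reverse {m : List Int} (a : Int) (hs : m.Pairwise (· ≤ ·)) :
    (stepA m a).reverse = stepR m.reverse a := by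
  have hi : pyBisectLeft m a = m.countP (fun x => decide (x < a)) :=
    takeWhile_len_eq_countP _ (by intro x y hxy hy; simp at hy ⊢; omega) m hs
  have hpart := List.length_eq_countP_add_countP (l := m) (p := fun x => decide (x < a))
  have hcompl : m.countP (fun x => ¬ decide (x < a)) = m.countP (fun x => decide (a ≤ x)) := by
    apply List.countP_congr
    intro x _
    simp
  have hile : m.countP (fun x => decide (x < a)) ≤ m.length := List.countP_le_length
  have hjrev : m.reverse.countP (fun x => decide (a ≤ x)) = m.countP (fun x => decide (a ≤ x)) :=
    List.countP_reverse
  unfold stepA stepR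
  simp only [hjrev, List.length_reverse]
  by_cases h0 : pyBisectLeft m a = 0
  · rw [if_pos h0]
    rw [hi] at h0
    have : m.countP (fun x => decide (a ≤ x)) = m.length := by omega
    rw [if_pos this]
    simp
  · rw [if_neg h0]
    rw [hi] at h0
    have hne : ¬ m.countP (fun x => decide (a ≤ x)) = m.length := by omega
    rw [if_neg hne]
    rw [hi, reverse_set _ _ _ (by omega)]
    congr 1
    omega

theorem stepA_sorted {m : List Int} (a : Int) (hs : m.Pairwise (· ≤ ·)) :
    (stepA m a).Pairwise (· ≤ ·) := by
  have h1 : (stepA m a).reverse.Pairwise (· ≥ ·) := by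
    rw [stepA_reverse a hs]
    exact stepR_sorted a (by rw [List.pairwise_reverse]; exact hs.imp (fun h => h))
  rw [List.pairwise_reverse] at h1
  exact h1.imp (by intro x y h; exact h)

theorem A_fold_reverse (l : List Int) :
    ∀ (m : List Int), m.Pairwise (· ≤ ·) →
      (l.foldl stepA m).reverse = l.foldl stepR m.reverse := by
  induction l with
  | nil => intro m _; rfl
  | cons a rest ih =>
    intro m hs
    simp only [List.foldl_cons]
    rw [← stepA_reverse a hs]
    exact ih _ (stepA_sorted a hs)

-- ===== VERDICT (by name: the statement is the Claim_ definition above) =====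
theorem sequence_decomposing_spec : Claim_equal_sequence_decomposing := by
  intro N A _ hpre
  unfold Spec_sequence_decomposing
  match A with
  | [] => exact absurd rfl hpre
  | x :: rest =>
    unfold sequence_decomposing sequence_decomposing_alt
    have hinv0 : DPInv ([] : List (Int × Int)) ([] : List Int) := by
      refine ⟨List.Pairwise.nil, ?_, ?_⟩ <;> intro k h <;> simp_all
    have hB := dp_fold (x :: rest) [] [] hinv0
    simp only [List.length_nil, Nat.cast_zero] at hB
    rw [hB]
    have hA := A_fold_reverse (x :: rest) [] List.Pairwise.nil
    simp only [List.reverse_nil] at hA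
    have hA1 : (x :: rest).foldl stepA [] = rest.foldl stepA [x] := by
      simp only [List.foldl_cons]
      congr 1
    have : ((rest.foldl stepA [x]).length : Int)
        = (((x :: rest).foldl stepR []).length : Int) := by
      rw [← hA1, ← hA, List.length_reverse]
    exact this
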